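-- pv_equiv track=rewrite | github.com/jmcol/unjumbler | unjumble.py | gather_word_permutations
-- ===== SOURCE A (Python) =====
-- from itertools import permutations
-- from typing import Any
-- from typing import Dict
-- from typing import List
--
-- def gather_word_permutations(letter_list: List[Any], lookup_dict: Dict[str, int]) -> List[Any]:
--     """Function to gather possible solutions by aggregating word permutations.
--
--     :param letter_list: List of letters in word jumble.
--     :param lookup_dict: Lookup dictionary of English words.
--     :return: List of permutations for a puzzle.
--     """
--     potentials = []
--     for grouping, frames in letter_list:
--         potential_solns = []
--         for frame in frames:
--             if not potential_solns:
--                 potential_solns = [[list(p)] for p in permutations(grouping, frame) if ''.join(p) in lookup_dict]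
--             else:
--                 folded_words = []
--                 for word_list in potential_solns:
--                     used = [item for sublist in word_list for item in sublist]
--                     available = [item for item in grouping if item not in used]
--                     sub_perms = permutations(available, frame)
--                     for sp in sub_perms:
--                         if ''.join(sp) in lookup_dict:
--                             folded_words.append([*word_list, list(sp)])
--                 potential_solns = folded_words
--
--         potentials.append(potential_solns)
--
--     return potentials
-- ===== SOURCE B (Python) =====
-- from itertools import permutations
--
--
-- def _valid_words(grouping, used, frame, lookup_dict):
--     """Dictionary words formed by permuting the still-available letters."""
--     available = []
--     for c in grouping:
--         if c not in used:
--             available.append(c)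
--     perms = permutations(available, frame)
--     words = []
--     for p in perms:
--         word = ''.join(p)
--         if word in lookup_dict:
--             words.append(list(p))
--     return words
--
--
-- def _solutions(grouping, frames, used, lookup_dict):
--     """Every way to fill all the frames, depth-first."""
--     if not frames:
--         return [[]]
--     out = []
--     words = _valid_words(grouping, used, frames[0], lookup_dict)
--     for word in words:
--         tails = _solutions(grouping, frames[1:], used + word, lookup_dict)
--         for rest in tails:
--             solution = [word] + rest
--             out.append(solution)
--     return out
--
--
-- def gather_word_permutations(letter_list, lookup_dict):
--     potentials = []
--     for grouping, frames in letter_list: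
--         if frames:
--             solutions = _solutions(grouping, frames, [], lookup_dict)
--             potentials.append(solutions)
--         else:
--             potentials.append([])
--     return potentials
-- ===== Notes on version B (the rewrite author's own statement) =====
-- stated objective: alternative
-- what changed: The level-by-level fold that rebuilds the whole list of partial solutions at every frame (with its re-firing seeding branch) is replaced by a plain recursive depth-first search that completes one solution at a time and returns [] for a grouping with no frames or no complete assignment.
-- intended difference: On puzzles where a grouping's frames cannot all be filled but A's restart chain (re-seeding after the first unfillable frame) ends in a fully fillable suffix, A returns word-lists covering only that suffix (skipping the unfillable frame and everything before it); B returns [] for that grouping, the intended 'no complete solution' answer. — e.g. on gather_word_permutations([(["a"], [2, 1])], [("a", 1)]): A returns [[[["a"]]]], B returns [[]]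
import Mathlib
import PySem

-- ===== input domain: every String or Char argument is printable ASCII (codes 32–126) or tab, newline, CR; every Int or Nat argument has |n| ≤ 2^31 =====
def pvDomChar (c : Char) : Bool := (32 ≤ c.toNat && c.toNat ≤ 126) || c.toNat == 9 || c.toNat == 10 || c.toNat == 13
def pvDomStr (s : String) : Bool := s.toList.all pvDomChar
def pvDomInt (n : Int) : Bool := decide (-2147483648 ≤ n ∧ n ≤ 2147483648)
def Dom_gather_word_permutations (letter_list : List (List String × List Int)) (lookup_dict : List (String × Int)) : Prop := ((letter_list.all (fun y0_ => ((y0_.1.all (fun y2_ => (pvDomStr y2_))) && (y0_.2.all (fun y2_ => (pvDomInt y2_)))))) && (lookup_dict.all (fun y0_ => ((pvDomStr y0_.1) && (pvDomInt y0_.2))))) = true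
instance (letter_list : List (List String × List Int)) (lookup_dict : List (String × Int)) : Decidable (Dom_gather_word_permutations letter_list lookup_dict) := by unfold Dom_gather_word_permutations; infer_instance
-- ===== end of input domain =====

-- B replaces A's level-by-level rebuild of all partial solutions (whose seeding
-- branch re-fires when a frame has no valid word) with a plain recursive
-- depth-first search returning [] when no complete assignment exists; the
-- re-fire inputs are documented as an intended difference (D_ below).

-- shared primitives (the same built-in calls and the same word-loop appear in
-- both Pythons): ''.join(p); 'key in lookup_dict' = key membership among the
-- dict's keys; itertools.permutations(xs, r) = PySem.List.permutations with
-- Python's immediate empty result when r exceeds len(xs); and the loop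
-- collecting the permutations whose join is in the dictionary.
def pvKey (ws : List String) : String := PySem.Str.join "" ws
def pvIn (lookup_dict : List (String × Int)) (s : String) : Bool :=
  (lookup_dict.map Prod.fst).contains s
def pvPerms (xs : List String) (r : Int) : List (List String) :=
  if r.toNat ≤ xs.length then PySem.List.permutations xs r.toNat else []
def pvValidWords (grouping : List String) (used : List String) (frame : Int) (lookup_dict : List (String × Int)) : List (List String) :=
  let available := grouping.foldl
    (fun acc c => if !(used.contains c) then acc ++ [c] else acc) []
  let perms := pvPerms available frame
  perms.foldl
    (fun words p =>
      let word := pvKey p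
      if pvIn lookup_dict word then words ++ [p] else words) []

-- ===== PORT A =====
def gather_word_permutations (letter_list : List (List String × List Int)) (lookup_dict : List (String × Int)) : List (List (List (List String))) :=
  letter_list.foldl (fun potentials gf =>
    let grouping := gf.1
    let potential_solns := gf.2.foldl (fun acc frame =>
      if acc.isEmpty then
        (pvPerms grouping frame).foldl
          (fun ps p => if pvIn lookup_dict (pvKey p) then ps ++ [[p]] else ps) []
      else
        let folded_words := acc.foldl (fun folded word_list =>
          let used := word_list.flatten
          folded ++ (pvValidWords grouping used frame lookup_dict).map
            (fun sp => word_list ++ [sp])) []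
        folded_words) []
    potentials ++ [potential_solns]) []

-- ===== PORT B =====
def pvSolutions (grouping : List String) (frames : List Int) (used : List String) (lookup_dict : List (String × Int)) : List (List (List String)) :=
  match frames with
  | [] => [[]]
  | frame :: rest =>
    let words := pvValidWords grouping used frame lookup_dict
    words.foldl
      (fun out word =>
        let tails := pvSolutions grouping rest (used ++ word) lookup_dict
        tails.foldl (fun out2 r =>
          let solution := word :: r
          out2 ++ [solution]) out) []

def gather_word_permutations_alt (letter_list : List (List String × List Int)) (lookup_dict : List (String × Int)) : List (List (List (List String))) :=
  letter_list.foldl (fun potentials gf =>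
    if !gf.2.isEmpty then
      let solutions := pvSolutions gf.1 gf.2 [] lookup_dict
      potentials ++ [solutions]
    else
      potentials ++ [[]]) []

-- ===== PRECONDITION & SPEC =====
-- Pre_ excludes exactly the inputs on which A raises: a negative frame makes
-- itertools.permutations(grouping, frame) raise ValueError.
def Pre_gather_word_permutations (letter_list : List (List String × List Int)) (lookup_dict : List (String × Int)) : Prop :=
  ∀ gf ∈ letter_list, ∀ frame ∈ gf.2, 0 ≤ frame
instance (letter_list : List (List String × List Int)) (lookup_dict : List (String × Int)) : Decidable (Pre_gather_word_permutations letter_list lookup_dict) := by unfold Pre_gather_word_permutations; infer_instance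

def pvWitness_gather_word_permutations : (List (List String × List Int)) × (List (String × Int)) :=
  ([(["a", "b"], [1, 2])], [("a", 1), ("ba", 2)])

-- how many frames of fs (from the front) a deepest word assignment can fill
def dDepth (fs : List Int) (u : List String) (g : List String) (d : List (String × Int)) : Nat :=
  match fs with
  | [] => 0
  | f :: ft =>
    List.foldr Nat.max 0 ((pvValidWords g u f d).map fun w => dDepth ft (u ++ w) g d + 1)

-- does A's restart chain (drop everything up to the first unfillable frame,
-- then try again) eventually fill a whole remaining suffix of frames?
def dRes (fs : List Int) (g : List String) (d : List (String × Int)) : Bool :=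
  match h : fs with
  | [] => false
  | _ :: _ => dDepth fs [] g d == fs.length || dRes (fs.drop (dDepth fs [] g d + 1)) g d
termination_by fs.length
decreasing_by simp [h]

-- On puzzles where a grouping's frames cannot all be filled but A's restart chain ends in a
-- fully fillable suffix, A returns word-lists covering only that suffix (skipping the
-- unfillable frame and everything before it); B returns [] for that grouping, the intended
-- 'no complete solution' answer.
def D_gather_word_permutations (letter_list : List (List String × List Int)) (lookup_dict : List (String × Int)) : Prop :=
  (letter_list.any fun gf =>
    dDepth gf.2 [] gf.1 lookup_dict != gf.2.length && dRes gf.2 gf.1 lookup_dict) = true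
instance (letter_list : List (List String × List Int)) (lookup_dict : List (String × Int)) : Decidable (D_gather_word_permutations letter_list lookup_dict) := by unfold D_gather_word_permutations; infer_instance

def Spec_gather_word_permutations (letter_list : List (List String × List Int)) (lookup_dict : List (String × Int)) (out : List (List (List (List String)))) : Prop := ¬ D_gather_word_permutations letter_list lookup_dict → out = gather_word_permutations_alt letter_list lookup_dict
instance (letter_list : List (List String × List Int)) (lookup_dict : List (String × Int)) (out : List (List (List (List String)))) : Decidable (Spec_gather_word_permutations letter_list lookup_dict out) := by unfold Spec_gather_word_permutations; infer_instance

def pvDiffWitness_gather_word_permutations : (List (List String × List Int)) × (List (String × Int)) :=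
  ([(["a"], [2, 1])], [("a", 1)])
def pvDiffWitnessOut_gather_word_permutations : (List (List (List (List String)))) × (List (List (List (List String)))) :=
  ([[[["a"]]]], [[]])

-- ===== CLAIM (what is proved, stated in full; the proofs are below) =====
def Claim_unchanged_gather_word_permutations : Prop := ∀ (letter_list : List (List String × List Int)) (lookup_dict : List (String × Int)), Dom_gather_word_permutations letter_list lookup_dict → Pre_gather_word_permutations letter_list lookup_dict → Spec_gather_word_permutations letter_list lookup_dict (gather_word_permutations letter_list lookup_dict)
def Claim_changed_gather_word_permutations : Prop := Dom_gather_word_permutations (pvDiffWitness_gather_word_permutations.1) (pvDiffWitness_gather_word_permutations.2) ∧ Pre_gather_word_permutations (pvDiffWitness_gather_word_permutations.1) (pvDiffWitness_gather_word_permutations.2) ∧ D_gather_word_permutations (pvDiffWitness_gather_word_permutations.1) (pvDiffWitness_gather_word_permutations.2) ∧ gather_word_permutations (pvDiffWitness_gather_word_permutations.1) (pvDiffWitness_gather_word_permutations.2) = pvDiffWitnessOut_gather_word_permutations.1 ∧ gather_word_permutations_alt (pvDiffWitness_gather_word_permutations.1) (pvDiffWitness_gather_word_permutations.2) = pvDiffWitnessOut_gather_word_permutations.2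 ∧ pvDiffWitnessOut_gather_word_permutations.1 ≠ pvDiffWitnessOut_gather_word_permutations.2
def Claim_exact_gather_word_permutations : Prop := ∀ (letter_list : List (List String × List Int)) (lookup_dict : List (String × Int)), Dom_gather_word_permutations letter_list lookup_dict → Pre_gather_word_permutations letter_list lookup_dict → D_gather_word_permutations letter_list lookup_dict → gather_word_permutations letter_list lookup_dict ≠ gather_word_permutations_alt letter_list lookup_dict

-- ===== LEMMAS AND PROOFS =====

-- the word loop of pvValidWords is a filter
theorem pvValidWords_eq (grouping used : List String) (frame : Int) (lookup_dict : List (String × Int)) :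
    pvValidWords grouping used frame lookup_dict
      = (pvPerms (grouping.filter (fun c => !used.contains c)) frame).filter
          (fun p => pvIn lookup_dict (pvKey p)) := by
  unfold pvValidWords
  rw [show (fun (words : List (List String)) p =>
        let word := pvKey p
        if pvIn lookup_dict word then words ++ [p] else words)
      = (fun (words : List (List String)) p =>
        if pvIn lookup_dict (pvKey p) then words ++ [p] else words) from rfl,
    PySem.List.foldl_append_if_eq_filter, PySem.List.foldl_append_if_eq_filter]
  simp

-- max of a list of naturals (left fold)
def pvM (l : List Nat) : Nat := l.foldl max 0

-- A's inner per-frame step function, verbatim from the port of A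
def pvStep0 (grouping : List String) (lookup_dict : List (String × Int)) (acc : List (List (List String))) (frame : Int) : List (List (List String)) :=
  if acc.isEmpty then
    (pvPerms grouping frame).foldl
      (fun ps p => if pvIn lookup_dict (pvKey p) then ps ++ [[p]] else ps) []
  else
    let folded_words := acc.foldl (fun folded word_list =>
      let used := word_list.flatten
      folded ++ (pvValidWords grouping used frame lookup_dict).map
        (fun sp => word_list ++ [sp])) []
    folded_words

-- one level of A's fold, as a flatMap
def pvSstep (grouping : List String) (lookup_dict : List (String × Int)) (frame : Int) (acc : List (List (List String))) : List (List (List String)) :=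
  acc.flatMap (fun wl => (pvValidWords grouping wl.flatten frame lookup_dict).map (fun w => wl ++ [w]))

-- DFS over the frames together with the depth of the deepest fillable prefix
def pvSearch (grouping : List String) (frames : List Int) (used : List String) (lookup_dict : List (String × Int)) : List (List (List String)) × Nat :=
  match frames with
  | [] => ([[]], 0)
  | frame :: rest =>
    (pvValidWords grouping used frame lookup_dict).foldl (fun sb word =>
      let td := pvSearch grouping rest (used ++ word) lookup_dict
      (sb.1 ++ td.1.map (fun tail => word :: tail), max sb.2 (1 + td.2))) ([], 0)

-- A's per-grouping result: DFS of the whole frame list, restarting past the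
-- first unfillable frame (this is what A's fold computes; proved below)
def pvSolveA (grouping : List String) (frames : List Int) (lookup_dict : List (String × Int)) : List (List (List String)) :=
  match h : frames with
  | [] => []
  | _ :: _ =>
    let sm := pvSearch grouping frames [] lookup_dict
    if sm.2 = frames.length then sm.1
    else pvSolveA grouping (frames.drop (sm.2 + 1)) lookup_dict
termination_by frames.length
decreasing_by simp [h]

-- deepest frame-prefix reachable from the partial solutions in acc
def pvK (grouping : List String) (lookup_dict : List (String × Int)) (acc : List (List (List String))) (frames : List Int) : Nat :=
  pvM (acc.map (fun wl => (pvSearch grouping frames wl.flatten lookup_dict).2))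

-- all completions of the partial solutions in acc through the remaining frames
def pvE (grouping : List String) (lookup_dict : List (String × Int)) (acc : List (List (List String))) (frames : List Int) : List (List (List String)) :=
  acc.flatMap (fun wl => (pvSearch grouping frames wl.flatten lookup_dict).1.map (fun t => wl ++ t))

theorem pvFoldlMax (l : List Nat) : ∀ b : Nat, l.foldl max b = max b (l.foldl max 0) := by
  induction l with
  | nil => simp
  | cons a l ih =>
    intro b
    simp only [List.foldl_cons]
    rw [ih (max b a), ih (max 0 a)]
    omega

theorem pvM_cons (a : Nat) (l : List Nat) : pvM (a :: l) = max a (pvM l) := by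
  unfold pvM
  simp only [List.foldl_cons]
  rw [pvFoldlMax]
  omega

theorem pvM_zero (l : List (List (List String))) : pvM (l.map (fun _ => 0)) = 0 := by
  induction l with
  | nil => rfl
  | cons a l ih => rw [List.map_cons, pvM_cons, ih]; rfl

theorem pvM_append (l1 l2 : List Nat) : pvM (l1 ++ l2) = max (pvM l1) (pvM l2) := by
  unfold pvM
  rw [List.foldl_append, pvFoldlMax]

theorem pvM_map_one_add (l : List Nat) (h : l ≠ []) : pvM (l.map (fun x => 1 + x)) = 1 + pvM l := by
  induction l with
  | nil => exact absurd rfl h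
  | cons a l ih =>
    cases l with
    | nil => simp [pvM]
    | cons b l =>
      rw [List.map_cons, pvM_cons, ih (by simp), pvM_cons a (b :: l)]
      omega

theorem pvM_le (l : List Nat) (m : Nat) (h : ∀ x ∈ l, x ≤ m) : pvM l ≤ m := by
  induction l with
  | nil => exact Nat.zero_le m
  | cons a l ih =>
    rw [pvM_cons]
    exact max_le (h a (by simp)) (ih (fun x hx => h x (by simp [hx])))

theorem pvM_ge (l : List Nat) (x : Nat) (h : x ∈ l) : x ≤ pvM l := by
  induction l with
  | nil => simp at h
  | cons a l ih =>
    rw [pvM_cons]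
    rcases List.mem_cons.mp h with rfl | hxl
    · omega
    · have := ih hxl
      omega

theorem pvM_mem (l : List Nat) (h : pvM l ≠ 0) : pvM l ∈ l := by
  induction l with
  | nil => exact absurd rfl h
  | cons a l ih =>
    rw [pvM_cons] at h ⊢
    rcases Nat.le_total a (pvM l) with hle | hle
    · rw [max_eq_right hle] at h ⊢
      exact List.mem_cons_of_mem a (ih h)
    · rw [max_eq_left hle]
      exact List.mem_cons_self

theorem pvM_eq_foldr (l : List Nat) : List.foldr Nat.max 0 l = pvM l := by
  induction l with
  | nil => rfl
  | cons a l ih => rw [List.foldr_cons, ih, pvM_cons]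

theorem gatherA_eq (letter_list : List (List String × List Int)) (lookup_dict : List (String × Int)) :
    gather_word_permutations letter_list lookup_dict
      = letter_list.map (fun gf => gf.2.foldl (pvStep0 gf.1 lookup_dict) []) := by
  unfold gather_word_permutations pvStep0
  rw [PySem.List.foldl_append_singleton_eq_map]
  rfl

theorem pvStep0_of_ne (grouping : List String) (lookup_dict : List (String × Int)) (acc : List (List (List String))) (frame : Int) (h : acc ≠ []) :
    pvStep0 grouping lookup_dict acc frame = pvSstep grouping lookup_dict frame acc := by
  unfold pvStep0 pvSstep
  rw [if_neg (by simpa using h)]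
  rw [show (fun (folded : List (List (List String))) word_list =>
        let used := word_list.flatten
        folded ++ (pvValidWords grouping used frame lookup_dict).map
          (fun sp => word_list ++ [sp]))
      = (fun (folded : List (List (List String))) word_list =>
        folded ++ (pvValidWords grouping word_list.flatten frame lookup_dict).map
          (fun sp => word_list ++ [sp])) from rfl,
    PySem.List.foldl_append_eq_flatMap]
  rfl

theorem pvStep0_nil (grouping : List String) (lookup_dict : List (String × Int)) (frame : Int) :
    pvStep0 grouping lookup_dict [] frame = pvSstep grouping lookup_dict frame [[]] := by
  unfold pvStep0 pvSstep
  rw [if_pos (show ([] : List (List (List String))).isEmpty = true from rfl),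
    PySem.List.foldl_append_if (f := fun p : List String => [p])]
  simp [pvValidWords_eq]

theorem pvSearchFold (grouping : List String) (lookup_dict : List (String × Int)) (used : List String) (rest : List Int) (l : List (List String)) :
    ∀ sb : List (List (List String)) × Nat,
      l.foldl (fun sb word =>
          let td := pvSearch grouping rest (used ++ word) lookup_dict
          (sb.1 ++ td.1.map (fun tail => word :: tail), max sb.2 (1 + td.2))) sb
        = (sb.1 ++ l.flatMap (fun w => (pvSearch grouping rest (used ++ w) lookup_dict).1.map (fun t => w :: t)),
           max sb.2 (pvM (l.map (fun w => 1 + (pvSearch grouping rest (used ++ w) lookup_dict).2)))) := by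
  induction l with
  | nil => intro sb; simp [pvM]
  | cons w l ih =>
    intro sb
    simp only [List.foldl_cons, List.flatMap_cons, List.map_cons]
    rw [ih, pvM_cons]
    refine Prod.ext (by simp) ?_
    simp only
    omega

theorem pvSearch_cons (grouping : List String) (lookup_dict : List (String × Int)) (used : List String) (frame : Int) (rest : List Int) :
    pvSearch grouping (frame :: rest) used lookup_dict
      = ((pvValidWords grouping used frame lookup_dict).flatMap
            (fun w => (pvSearch grouping rest (used ++ w) lookup_dict).1.map (fun t => w :: t)),
         pvM ((pvValidWords grouping used frame lookup_dict).map
            (fun w => 1 + (pvSearch grouping rest (used ++ w) lookup_dict).2))) := by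
  show (pvValidWords grouping used frame lookup_dict).foldl _ ([], 0) = _
  rw [pvSearchFold]
  simp

theorem pvE_nil (grouping : List String) (lookup_dict : List (String × Int)) (acc : List (List (List String))) :
    pvE grouping lookup_dict acc [] = acc := by
  simp [pvE, pvSearch]

theorem pvE_cons (grouping : List String) (lookup_dict : List (String × Int)) (acc : List (List (List String))) (frame : Int) (rest : List Int) :
    pvE grouping lookup_dict acc (frame :: rest)
      = pvE grouping lookup_dict (pvSstep grouping lookup_dict frame acc) rest := by
  unfold pvE pvSstep
  rw [List.flatMap_assoc]
  refine List.flatMap_congr (fun wl _ => ?_)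
  rw [pvSearch_cons]
  simp only [List.map_flatMap, List.flatMap_map, List.map_map]
  refine List.flatMap_congr (fun w _ => ?_)
  simp [List.flatten_append, List.append_assoc]

theorem pvK_acc_cons (grouping : List String) (lookup_dict : List (String × Int)) (wl : List (List String)) (acc : List (List (List String))) (frames : List Int) :
    pvK grouping lookup_dict (wl :: acc) frames
      = max ((pvSearch grouping frames wl.flatten lookup_dict).2) (pvK grouping lookup_dict acc frames) := by
  unfold pvK
  rw [List.map_cons, pvM_cons]

theorem pvK_acc_append (grouping : List String) (lookup_dict : List (String × Int)) (l1 l2 : List (List (List String))) (frames : List Int) :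
    pvK grouping lookup_dict (l1 ++ l2) frames
      = max (pvK grouping lookup_dict l1 frames) (pvK grouping lookup_dict l2 frames) := by
  unfold pvK
  rw [List.map_append, pvM_append]

theorem pvSstep_acc_cons (grouping : List String) (lookup_dict : List (String × Int)) (frame : Int) (wl : List (List String)) (acc : List (List (List String))) :
    pvSstep grouping lookup_dict frame (wl :: acc)
      = (pvValidWords grouping wl.flatten frame lookup_dict).map (fun w => wl ++ [w])
        ++ pvSstep grouping lookup_dict frame acc := by
  simp [pvSstep]

theorem pvK_nil (grouping : List String) (lookup_dict : List (String × Int)) (acc : List (List (List String))) :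
    pvK grouping lookup_dict acc [] = 0 := by
  unfold pvK
  rw [show (fun wl : List (List String) => (pvSearch grouping [] wl.flatten lookup_dict).2) = (fun _ => 0) from rfl]
  exact pvM_zero acc

theorem pvK_cons (grouping : List String) (lookup_dict : List (String × Int)) (acc : List (List (List String))) (frame : Int) (rest : List Int) :
    pvK grouping lookup_dict acc (frame :: rest)
      = if pvSstep grouping lookup_dict frame acc = [] then 0
        else pvK grouping lookup_dict (pvSstep grouping lookup_dict frame acc) rest + 1 := by
  induction acc with
  | nil => simp [pvK, pvSstep, pvM]
  | cons wl acc ih =>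
    rw [pvK_acc_cons, pvSstep_acc_cons, ih]
    have hS2 : (pvSearch grouping (frame :: rest) wl.flatten lookup_dict).2
        = pvM ((pvValidWords grouping wl.flatten frame lookup_dict).map
            (fun w => 1 + (pvSearch grouping rest (wl.flatten ++ w) lookup_dict).2)) := by
      rw [pvSearch_cons]
    by_cases hW : pvValidWords grouping wl.flatten frame lookup_dict = []
    · rw [hW] at hS2
      simp only [List.map_nil] at hS2
      rw [hS2, hW]
      simp only [List.map_nil, List.nil_append]
      have : pvM [] = 0 := rfl
      rw [this]
      by_cases hS : pvSstep grouping lookup_dict frame acc = []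
      · simp [hS]
      · simp [hS]
    · have hA : pvK grouping lookup_dict
          ((pvValidWords grouping wl.flatten frame lookup_dict).map (fun w => wl ++ [w])) rest
          = pvM ((pvValidWords grouping wl.flatten frame lookup_dict).map
              (fun w => (pvSearch grouping rest (wl.flatten ++ w) lookup_dict).2)) := by
        unfold pvK
        rw [List.map_map]
        congr 1
        refine List.map_congr_left (fun w _ => ?_)
        simp
      have hd0 : (pvSearch grouping (frame :: rest) wl.flatten lookup_dict).2
          = 1 + pvM ((pvValidWords grouping wl.flatten frame lookup_dict).map
              (fun w => (pvSearch grouping rest (wl.flatten ++ w) lookup_dict).2)) := by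
        rw [hS2,
          show (pvValidWords grouping wl.flatten frame lookup_dict).map
              (fun w => 1 + (pvSearch grouping rest (wl.flatten ++ w) lookup_dict).2)
            = ((pvValidWords grouping wl.flatten frame lookup_dict).map
              (fun w => (pvSearch grouping rest (wl.flatten ++ w) lookup_dict).2)).map
                (fun x => 1 + x) by rw [List.map_map]; rfl,
          pvM_map_one_add _ (by simpa using hW)]
      have hmapne : (pvValidWords grouping wl.flatten frame lookup_dict).map (fun w => wl ++ [w]) ≠ [] := by
        simpa using hW
      rw [hd0, if_neg (fun hcontra => hmapne (List.append_eq_nil_iff.mp hcontra).1)]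
      rw [pvK_acc_append, hA]
      by_cases hS : pvSstep grouping lookup_dict frame acc = []
      · rw [if_pos hS, hS]
        have : pvK grouping lookup_dict ([] : List (List (List String))) rest = 0 := by
          simp [pvK, pvM]
        rw [this]
        omega
      · rw [if_neg hS]
        omega

theorem pvLoop_of_ne (grouping : List String) (lookup_dict : List (String × Int)) (frames : List Int) :
    ∀ acc, acc ≠ [] →
      frames.foldl (pvStep0 grouping lookup_dict) acc
        = if pvK grouping lookup_dict acc frames = frames.length
          then pvE grouping lookup_dict acc frames
          else (frames.drop (pvK grouping lookup_dict acc frames + 1)).foldl (pvStep0 grouping lookup_dict) [] := by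
  induction frames with
  | nil =>
    intro acc hacc
    rw [if_pos]
    · rw [List.foldl_nil, pvE_nil]
    · rw [pvK_nil]; rfl
  | cons frame rest ih =>
    intro acc hacc
    rw [List.foldl_cons, pvStep0_of_ne _ _ _ _ hacc, pvK_cons]
    by_cases hS : pvSstep grouping lookup_dict frame acc = []
    · rw [hS, if_pos rfl, if_neg (by simp), List.drop_succ_cons, List.drop_zero]
    · rw [if_neg hS, ih _ hS, pvE_cons, List.length_cons, List.drop_succ_cons]
      by_cases hK : pvK grouping lookup_dict (pvSstep grouping lookup_dict frame acc) rest = rest.length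
      · rw [if_pos hK, if_pos (by omega)]
      · rw [if_neg hK, if_neg (by omega)]

theorem pvLoop_eq_solveA (grouping : List String) (lookup_dict : List (String × Int)) :
    ∀ (n : Nat) (frames : List Int), frames.length ≤ n →
      frames.foldl (pvStep0 grouping lookup_dict) [] = pvSolveA grouping frames lookup_dict := by
  intro n
  induction n with
  | zero =>
    intro frames h
    have : frames = [] := List.eq_nil_of_length_eq_zero (Nat.le_zero.mp h)
    subst this
    rw [pvSolveA]; rfl
  | succ n ih =>
    intro frames h
    cases frames with
    | nil => rw [pvSolveA]; rfl
    | cons frame rest =>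
      have h1 : ([[]] : List (List (List String))) ≠ [] := by simp
      rw [List.foldl_cons, pvStep0_nil,
        show rest.foldl (pvStep0 grouping lookup_dict) (pvSstep grouping lookup_dict frame [[]])
            = (frame :: rest).foldl (pvStep0 grouping lookup_dict) [[]] by
          rw [List.foldl_cons, pvStep0_of_ne _ _ _ _ h1],
        pvLoop_of_ne _ _ _ _ h1]
      have hK : pvK grouping lookup_dict [[]] (frame :: rest)
          = (pvSearch grouping (frame :: rest) [] lookup_dict).2 := by
        simp [pvK, pvM]
      have hE : pvE grouping lookup_dict [[]] (frame :: rest)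
          = (pvSearch grouping (frame :: rest) [] lookup_dict).1 := by
        simp [pvE]
      rw [hK, hE, pvSolveA]
      by_cases hcond : (pvSearch grouping (frame :: rest) [] lookup_dict).2 = (frame :: rest).length
      · rw [if_pos hcond, if_pos hcond]
      · rw [if_neg hcond, if_neg hcond]
        refine ih _ ?_
        simp only [List.length_cons, List.length_drop] at h ⊢
        omega

-- B's DFS returns exactly the solution component of pvSearch
theorem pvSolutions_eq_search (grouping : List String) (lookup_dict : List (String × Int)) :
    ∀ (frames : List Int) (used : List String),
      pvSolutions grouping frames used lookup_dict = (pvSearch grouping frames used lookup_dict).1 := by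
  intro frames
  induction frames with
  | nil => intro used; rfl
  | cons frame rest ih =>
    intro used
    show (pvValidWords grouping used frame lookup_dict).foldl _ [] = _
    have hinner : ∀ (word : List String) (out : List (List (List String))),
        (pvSolutions grouping rest (used ++ word) lookup_dict).foldl
            (fun out2 r => out2 ++ [word :: r]) out
          = out ++ (pvSearch grouping rest (used ++ word) lookup_dict).1.map (fun r => word :: r) := by
      intro word out
      rw [PySem.List.foldl_append_singleton_eq_map, ih]
    rw [show (fun (out : List (List (List String))) word =>
          (pvSolutions grouping rest (used ++ word) lookup_dict).foldl
            (fun out2 r => out2 ++ [word :: r]) out)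
        = (fun out word => out
            ++ (pvSearch grouping rest (used ++ word) lookup_dict).1.map (fun r => word :: r)) from
      funext fun out => funext fun word => hinner word out]
    rw [PySem.List.foldl_append_eq_flatMap, pvSearch_cons]
    rfl

theorem pvSearch_depth_le (grouping : List String) (lookup_dict : List (String × Int)) :
    ∀ (frames : List Int) (used : List String),
      (pvSearch grouping frames used lookup_dict).2 ≤ frames.length := by
  intro frames
  induction frames with
  | nil => intro used; exact Nat.zero_le _
  | cons frame rest ih =>
    intro used
    rw [pvSearch_cons]
    refine pvM_le _ _ (fun x hx => ?_)
    obtain ⟨w, _, rfl⟩ := List.mem_map.mp hx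
    have := ih (used ++ w)
    simp only [List.length_cons]
    omega

theorem pvSearch_sols_ne_imp (grouping : List String) (lookup_dict : List (String × Int)) :
    ∀ (frames : List Int) (used : List String),
      (pvSearch grouping frames used lookup_dict).1 ≠ [] →
      (pvSearch grouping frames used lookup_dict).2 = frames.length := by
  intro frames
  induction frames with
  | nil => intro used _; rfl
  | cons frame rest ih =>
    intro used hne
    rw [pvSearch_cons] at hne ⊢
    simp only at hne ⊢
    obtain ⟨s, hs⟩ := List.exists_mem_of_ne_nil _ hne
    obtain ⟨w, hw, hs'⟩ := List.mem_flatMap.mp hs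
    have hsub : (pvSearch grouping rest (used ++ w) lookup_dict).1 ≠ [] := by
      intro hnil
      rw [hnil] at hs'
      simp at hs'
    have hd := ih (used ++ w) hsub
    have hmem : 1 + (pvSearch grouping rest (used ++ w) lookup_dict).2
        ∈ (pvValidWords grouping used frame lookup_dict).map
            (fun w => 1 + (pvSearch grouping rest (used ++ w) lookup_dict).2) :=
      List.mem_map.mpr ⟨w, hw, rfl⟩
    have hge := pvM_ge _ _ hmem
    rw [hd] at hge
    have hle : pvM ((pvValidWords grouping used frame lookup_dict).map
        (fun w => 1 + (pvSearch grouping rest (used ++ w) lookup_dict).2)) ≤ rest.length + 1 := by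
      refine pvM_le _ _ (fun x hx => ?_)
      obtain ⟨w', _, rfl⟩ := List.mem_map.mp hx
      have := pvSearch_depth_le grouping lookup_dict rest (used ++ w')
      omega
    simp only [List.length_cons]
    omega

theorem pvSearch_depth_full_imp (grouping : List String) (lookup_dict : List (String × Int)) :
    ∀ (frames : List Int) (used : List String),
      (pvSearch grouping frames used lookup_dict).2 = frames.length →
      (pvSearch grouping frames used lookup_dict).1 ≠ [] := by
  intro frames
  induction frames with
  | nil => intro used _; simp [pvSearch]
  | cons frame rest ih =>
    intro used hd
    rw [pvSearch_cons] at hd ⊢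
    simp only at hd ⊢
    have hne0 : pvM ((pvValidWords grouping used frame lookup_dict).map
        (fun w => 1 + (pvSearch grouping rest (used ++ w) lookup_dict).2)) ≠ 0 := by
      rw [hd]; simp
    have hmem := pvM_mem _ hne0
    rw [hd] at hmem
    obtain ⟨w, hw, heq⟩ := List.mem_map.mp hmem
    have hdw : (pvSearch grouping rest (used ++ w) lookup_dict).2 = rest.length := by
      simp only [List.length_cons] at heq
      omega
    have hsub := ih (used ++ w) hdw
    intro hnil
    have : (pvSearch grouping rest (used ++ w) lookup_dict).1.map (fun t => w :: t) = [] := by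
      have := List.flatMap_eq_nil_iff.mp hnil
      exact this _ hw
    rw [List.map_eq_nil_iff] at this
    exact hsub this

-- dDepth is the depth component of pvSearch
theorem dDepth_eq_search (grouping : List String) (lookup_dict : List (String × Int)) :
    ∀ (frames : List Int) (used : List String),
      dDepth frames used grouping lookup_dict = (pvSearch grouping frames used lookup_dict).2 := by
  intro frames
  induction frames with
  | nil => intro used; rfl
  | cons frame rest ih =>
    intro used
    show List.foldr Nat.max 0 ((pvValidWords grouping used frame lookup_dict).map
        fun w => dDepth rest (used ++ w) grouping lookup_dict + 1) = _
    rw [pvM_eq_foldr,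
      List.map_congr_left (l := pvValidWords grouping used frame lookup_dict)
        (g := fun w : List String => 1 + (pvSearch grouping rest (used ++ w) lookup_dict).2)
        (fun w _ => by rw [ih, Nat.add_comm]),
      pvSearch_cons]

-- dRes decides whether A's restart chain ends with a non-empty solution list
theorem dRes_false_chain (grouping : List String) (lookup_dict : List (String × Int)) :
    ∀ (n : Nat) (frames : List Int), frames.length ≤ n →
      dRes frames grouping lookup_dict = false →
      pvSolveA grouping frames lookup_dict = [] := by
  intro n
  induction n with
  | zero =>
    intro frames h _
    have : frames = [] := List.eq_nil_of_length_eq_zero (Nat.le_zero.mp h)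
    subst this
    rw [pvSolveA]
  | succ n ih =>
    intro frames h hres
    cases frames with
    | nil => rw [pvSolveA]
    | cons frame rest =>
      rw [dRes] at hres
      rw [Bool.or_eq_false_iff] at hres
      obtain ⟨hk, hrest⟩ := hres
      rw [beq_eq_false_iff_ne] at hk
      rw [pvSolveA]
      rw [← dDepth_eq_search]
      rw [if_neg hk]
      refine ih _ ?_ hrest
      simp only [List.length_cons, List.length_drop] at h ⊢
      omega

theorem dRes_true_chain (grouping : List String) (lookup_dict : List (String × Int)) :
    ∀ (n : Nat) (frames : List Int), frames.length ≤ n →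
      dRes frames grouping lookup_dict = true →
      pvSolveA grouping frames lookup_dict ≠ [] := by
  intro n
  induction n with
  | zero =>
    intro frames h hres
    have : frames = [] := List.eq_nil_of_length_eq_zero (Nat.le_zero.mp h)
    subst this
    rw [dRes] at hres
    exact absurd hres (by simp)
  | succ n ih =>
    intro frames h hres
    cases frames with
    | nil =>
      rw [dRes] at hres
      exact absurd hres (by simp)
    | cons frame rest =>
      rw [dRes, Bool.or_eq_true] at hres
      rw [pvSolveA]
      rw [← dDepth_eq_search]
      by_cases hk : dDepth (frame :: rest) [] grouping lookup_dict = (frame :: rest).length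
      · rw [if_pos hk]
        refine pvSearch_depth_full_imp grouping lookup_dict (frame :: rest) [] ?_
        rw [← dDepth_eq_search]; exact hk
      · rw [if_neg hk]
        rcases hres with hfl | hrest
        · exact absurd (by exact beq_iff_eq.mp hfl) hk
        · refine ih _ ?_ hrest
          simp only [List.length_cons, List.length_drop] at h ⊢
          omega

-- per-grouping agreement outside D_
theorem pvElem_eq (grouping : List String) (frames : List Int) (lookup_dict : List (String × Int))
    (h : ¬ (dDepth frames [] grouping lookup_dict ≠ frames.length ∧ dRes frames grouping lookup_dict = true)) :
    pvSolveA grouping frames lookup_dict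
      = (if frames.isEmpty then [] else pvSolutions grouping frames [] lookup_dict) := by
  cases frames with
  | nil => rw [pvSolveA]; rfl
  | cons frame rest =>
    simp only [List.isEmpty_cons, if_neg Bool.false_ne_true]
    rw [pvSolutions_eq_search, pvSolveA]
    by_cases hk : (pvSearch grouping (frame :: rest) [] lookup_dict).2 = (frame :: rest).length
    · rw [if_pos hk]
    · rw [if_neg hk]
      have hk' : dDepth (frame :: rest) [] grouping lookup_dict ≠ (frame :: rest).length := by
        rw [dDepth_eq_search]; exact hk
      have hres : dRes (frame :: rest) grouping lookup_dict = false := by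
        rcases Bool.eq_false_or_eq_true (dRes (frame :: rest) grouping lookup_dict) with ht | hf
        · exact absurd ⟨hk', ht⟩ h
        · exact hf
      rw [dRes, Bool.or_eq_false_iff] at hres
      have hs1 : (pvSearch grouping (frame :: rest) [] lookup_dict).1 = [] := by
        by_contra hne
        exact hk (pvSearch_sols_ne_imp grouping lookup_dict _ [] hne)
      rw [hs1, ← dDepth_eq_search]
      exact dRes_false_chain grouping lookup_dict _ _ le_rfl hres.2

-- A and B as maps over letter_list
theorem gatherA_map (letter_list : List (List String × List Int)) (lookup_dict : List (String × Int)) :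
    gather_word_permutations letter_list lookup_dict
      = letter_list.map (fun gf => pvSolveA gf.1 gf.2 lookup_dict) := by
  rw [gatherA_eq]
  exact List.map_congr_left (fun gf _ => pvLoop_eq_solveA gf.1 lookup_dict gf.2.length gf.2 le_rfl)

theorem gatherB_map (letter_list : List (List String × List Int)) (lookup_dict : List (String × Int)) :
    gather_word_permutations_alt letter_list lookup_dict
      = letter_list.map (fun gf => if gf.2.isEmpty then [] else pvSolutions gf.1 gf.2 [] lookup_dict) := by
  unfold gather_word_permutations_alt
  rw [show (fun (potentials : List (List (List (List String)))) (gf : List String × List Int) =>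
        if !gf.2.isEmpty then
          let solutions := pvSolutions gf.1 gf.2 [] lookup_dict
          potentials ++ [solutions]
        else
          potentials ++ [[]])
      = (fun potentials gf =>
        potentials ++ [if gf.2.isEmpty then [] else pvSolutions gf.1 gf.2 [] lookup_dict]) from
    funext fun p => funext fun gf => by cases h : gf.2.isEmpty <;> simp [h],
    PySem.List.foldl_append_singleton_eq_map]
  rfl

-- evaluating dDepth and dRes at the difference witness
theorem dDepth_wit0 : dDepth [2, 1] [] ["a"] [("a", 1)] = 0 := by
  rw [dDepth_eq_search]; decide
theorem dDepth_wit1 : dDepth [1] [] ["a"] [("a", 1)] = 1 := by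
  rw [dDepth_eq_search]; decide
theorem dRes_wit : dRes [2, 1] ["a"] [("a", 1)] = true := by
  rw [dRes.eq_def]
  simp only [dDepth_wit0]
  rw [dRes.eq_def]
  simp [dDepth_wit1]

-- ===== VERDICT (by name: the statements are the Claim_ definitions above) =====
theorem gather_word_permutations_spec : Claim_unchanged_gather_word_permutations := by
  intro letter_list lookup_dict _ _
  unfold Spec_gather_word_permutations
  intro hnD
  unfold D_gather_word_permutations at hnD
  rw [Bool.not_eq_true, List.any_eq_false] at hnD
  rw [gatherA_map, gatherB_map]
  refine List.map_congr_left (fun gf hgf => ?_)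
  refine pvElem_eq gf.1 gf.2 lookup_dict (fun ⟨hne, hres⟩ => ?_)
  have hgf' := hnD gf hgf
  rw [Bool.not_eq_true, Bool.and_eq_false_iff] at hgf'
  rcases hgf' with hcon | hcon
  · refine absurd ?_ hne
    rcases Bool.eq_false_or_eq_true (dDepth gf.2 [] gf.1 lookup_dict == gf.2.length) with hb | hb
    · exact beq_iff_eq.mp hb
    · rw [show (dDepth gf.2 [] gf.1 lookup_dict != gf.2.length)
            = !(dDepth gf.2 [] gf.1 lookup_dict == gf.2.length) from rfl, hb] at hcon
      exact absurd hcon (by simp)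
  · rw [hres] at hcon
    exact absurd hcon (by simp)

theorem gather_word_permutations_changed : Claim_changed_gather_word_permutations := by
  unfold Claim_changed_gather_word_permutations
  refine ⟨by decide, by decide, ?_, by decide, by decide, by decide⟩
  unfold D_gather_word_permutations pvDiffWitness_gather_word_permutations
  simp [List.any_cons, List.any_nil, dRes_wit, dDepth_wit0]

theorem gather_word_permutations_tight : Claim_exact_gather_word_permutations := by
  intro letter_list lookup_dict _ _ hD heq
  unfold D_gather_word_permutations at hD
  obtain ⟨gf, hgf, hp⟩ := List.any_eq_true.mp hD
  rw [Bool.and_eq_true] at hp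
  obtain ⟨hne, hres⟩ := hp
  simp only [bne_iff_ne] at hne
  rw [gatherA_map, gatherB_map] at heq
  have helem := (List.map_eq_map_iff.mp heq) gf hgf
  have hA : pvSolveA gf.1 gf.2 lookup_dict ≠ [] :=
    dRes_true_chain gf.1 lookup_dict gf.2.length gf.2 le_rfl hres
  have hB : (if gf.2.isEmpty then [] else pvSolutions gf.1 gf.2 [] lookup_dict)
      = ([] : List (List (List String))) := by
    cases hfr : gf.2 with
    | nil => simp
    | cons frame rest =>
      simp only [List.isEmpty_cons, if_neg Bool.false_ne_true]
      rw [pvSolutions_eq_search]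
      by_contra hcon
      have hfulllen := pvSearch_sols_ne_imp gf.1 lookup_dict (frame :: rest) [] hcon
      rw [← dDepth_eq_search] at hfulllen
      rw [hfr] at hne
      exact hne hfulllen
  rw [helem, hB] at hA
  exact hA rfl
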